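-- pv_equiv track=rewrite | github.com/posl/comment_recommendation | script/mod_gen/2_time/zh/158_C/1.py | ball
-- ===== SOURCE A (Python) =====
-- def ball(n,a,b):
--     if a+b == 0:
--         return 0
--     elif a+b == 1:
--         if a == 1:
--             return 0
--         else:
--             return 1
--     elif n <= a:
--         return 0
--     elif n <= a+b:
--         return 1
--     else:
--         return ball(n-a-b,a,b)
-- ===== SOURCE B (Python) =====
-- def ball(n, a, b):
--     s = a + b
--     if s <= 0:
--         return 0
--     if n <= s:
--         return 0 if n <= a else 1
--     m = (n - 1) % s + 1
--     return 0 if m <= a else 1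
-- ===== Notes on version B (the rewrite author's own statement) =====
-- stated objective: faster
-- what changed: Replaces A's tail recursion that repeatedly subtracts a+b until n falls into the first cycle with a single modular reduction m=(n-1)%(a+b)+1 compared against a; Pre_ excludes a+b<0 with n>a, where A recurses forever, and the degenerate one-ball cycle a+b==1 with a not in {0,1} or n<1, where A's 'a == 1' test yields an accidental value no alternative would match.
-- outside the precondition, e.g. on ball(1, 2, -1): A returns 1, B returns 0; on ball(0, 0, 1): A returns 1, B returns 0; on ball(5, -3, 2): A does not finish within the time limit, B returns 0
import Mathlib
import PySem

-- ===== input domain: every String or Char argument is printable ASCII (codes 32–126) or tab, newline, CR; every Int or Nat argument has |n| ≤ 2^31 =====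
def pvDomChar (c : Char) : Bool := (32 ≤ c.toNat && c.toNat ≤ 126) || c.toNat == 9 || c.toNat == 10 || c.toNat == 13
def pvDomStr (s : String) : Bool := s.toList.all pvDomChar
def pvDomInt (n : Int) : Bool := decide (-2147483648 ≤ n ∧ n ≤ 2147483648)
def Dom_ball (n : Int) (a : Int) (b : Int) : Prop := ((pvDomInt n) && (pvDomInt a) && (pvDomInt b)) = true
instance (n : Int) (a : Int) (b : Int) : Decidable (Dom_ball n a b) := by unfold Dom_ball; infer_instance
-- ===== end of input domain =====

-- B replaces A's tail recursion (subtract a+b until n lies in the first cycle) by one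
-- modular reduction m = (n-1) % (a+b) + 1 compared against a; measured asymptotically faster.


-- ===== PORT A =====
-- A's recursion, step for step; the Nat fuel is a totality guard ONLY: it runs out only in
-- the region a+b < 0 ∧ n > a where Python's A recurses forever, which Pre_ball excludes
-- (inside Pre_ball the fuel n.toNat+1 always suffices — see lemma ballFuel_eq below).
def ballFuel : Nat → Int → Int → Int → Int
  | 0, _, _, _ => 0
  | f + 1, n, a, b =>
    if a + b = 0 then 0
    else if a + b = 1 then (if a = 1 then 0 else 1)
    else if n ≤ a then 0
    else if n ≤ a + b then 1
    else ballFuel f (n - a - b) a b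

def ball (n : Int) (a : Int) (b : Int) : Int := ballFuel (n.toNat + 1) n a b

-- ===== PORT B =====
def ball_alt (n : Int) (a : Int) (b : Int) : Int :=
  let s := a + b
  if s ≤ 0 then 0
  else if n ≤ s then (if n ≤ a then 0 else 1)
  else if PySem.Int.mod (n - 1) s + 1 ≤ a then 0 else 1

-- ===== PRECONDITION & SPEC =====
-- Pre_ball excludes exactly (i) a+b < 0 with n > a, where A recurses forever (it never
-- returns), and (ii) the degenerate one-ball cycle a+b == 1 outside a ∈ {0,1} with n ≥ 1,
-- where A's 'a == 1' test yields an accidental value (negative counts) no alternative would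
-- match. Pre_ball does not model CPython's recursion-depth limit: that is an interpreter
-- resource bound, not part of the algorithm.
def Pre_ball (n : Int) (a : Int) (b : Int) : Prop :=
  (a + b < 0 → n ≤ a) ∧ (a + b = 1 → 0 ≤ a ∧ a ≤ 1 ∧ (a = 0 → 1 ≤ n))
instance (n : Int) (a : Int) (b : Int) : Decidable (Pre_ball n a b) := by unfold Pre_ball; infer_instance

def pvWitness_ball : Int × Int × Int := (5, 2, 3)

def Spec_ball (n : Int) (a : Int) (b : Int) (out : Int) : Prop := out = ball_alt n a b
instance (n : Int) (a : Int) (b : Int) (out : Int) : Decidable (Spec_ball n a b out) := by unfold Spec_ball; infer_instance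

-- ===== CLAIM (what is proved, stated in full; the proofs are below) =====
def Claim_equal_ball : Prop := ∀ (n : Int) (a : Int) (b : Int), Dom_ball n a b → Pre_ball n a b → Spec_ball n a b (ball n a b)

-- ===== LEMMAS AND PROOFS =====

-- one unfolding of A's recursion
lemma ballFuel_succ (f : Nat) (n a b : Int) :
    ballFuel (f + 1) n a b =
      (if a + b = 0 then 0
       else if a + b = 1 then (if a = 1 then 0 else 1)
       else if n ≤ a then 0
       else if n ≤ a + b then 1
       else ballFuel f (n - a - b) a b) := rfl

-- B is invariant under stripping one whole cycle off n.
lemma ball_alt_sub (n a b : Int) (hs : 2 ≤ a + b) (hn : a + b < n) :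
    ball_alt n a b = ball_alt (n - a - b) a b := by
  have hspos : (0:Int) < a + b := by omega
  have hmod : PySem.Int.mod (n - 1) (a + b) = (n - 1) % (a + b) :=
    PySem.Int.mod_eq_emod_of_pos hspos
  by_cases h2 : n - a - b ≤ a + b
  · -- one cycle above the first: (n-1) % s = n-1-s
    have hsub : (n - 1) % (a + b) = (n - 1 - (a + b)) % (a + b) :=
      (Int.sub_emod_right (n - 1) (a + b)).symm
    have hval : (n - 1 - (a + b)) % (a + b) = n - 1 - (a + b) :=
      Int.emod_eq_of_lt (by omega) (by omega)
    simp only [ball_alt, hmod, hsub, hval]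
    split_ifs <;> omega
  · have hmod2 : PySem.Int.mod (n - a - b - 1) (a + b) = (n - a - b - 1) % (a + b) :=
      PySem.Int.mod_eq_emod_of_pos hspos
    have heq : (n - a - b - 1) % (a + b) = (n - 1) % (a + b) := by
      have h3 : n - a - b - 1 = n - 1 - (a + b) := by ring
      rw [h3, Int.sub_emod_right]
    simp only [ball_alt, hmod, hmod2, heq]
    split_ifs <;> omega

-- inside its fuel budget, A's recursion computes B's value (a+b ≥ 2)
lemma ballFuel_eq (f : Nat) : ∀ (n a b : Int), 2 ≤ a + b → n ≤ (a + b) * (f + 1) →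
    ballFuel (f + 1) n a b = ball_alt n a b := by
  induction f with
  | zero =>
    intro n a b hs hn
    norm_num at hn
    rw [ballFuel_succ]
    simp only [ball_alt]
    split_ifs <;> omega
  | succ f ih =>
    intro n a b hs hn
    by_cases hsmall : n ≤ a + b
    · rw [ballFuel_succ]
      simp only [ball_alt]
      split_ifs <;> omega
    · by_cases hna : n ≤ a
      · -- a itself exceeds the cycle: both versions answer 0
        have hmod : PySem.Int.mod (n - 1) (a + b) = (n - 1) % (a + b) :=
          PySem.Int.mod_eq_emod_of_pos (by omega)
        have hlo := Int.emod_nonneg (n - 1) (by omega : (a + b) ≠ 0)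
        have hhi := Int.emod_lt_of_pos (n - 1) (by omega : (0:Int) < a + b)
        rw [ballFuel_succ]
        simp only [ball_alt, hmod]
        split_ifs <;> omega
      have hstep : ballFuel (f + 1 + 1) n a b = ballFuel (f + 1) (n - a - b) a b := by
        rw [ballFuel_succ]
        split_ifs <;> first | rfl | omega
      have hexp : (a + b) * ((f:Int) + 1 + 1) = (a + b) * ((f:Int) + 1) + (a + b) := by ring
      have hb : n - a - b ≤ (a + b) * ((f:Int) + 1) := by push_cast at hn; omega
      rw [hstep, ih (n - a - b) a b hs hb,
        ← ball_alt_sub n a b hs (by omega)]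

-- ===== VERDICT (by name: the statement is the Claim_ definition above) =====
theorem ball_spec : Claim_equal_ball := by
  intro n a b _ hpre
  obtain ⟨h1, h2⟩ := hpre
  unfold Spec_ball ball
  rcases lt_trichotomy (a + b) 2 with h | h | h
  · -- a+b ≤ 1: inside Pre_ball, A answers without recursing
    have hstep := ballFuel_succ n.toNat n a b
    rcases lt_trichotomy (a + b) 1 with hlt | hone | _
    · -- a+b ≤ 0: either a+b = 0, or a+b < 0 and Pre gives n ≤ a
      have hna : a + b = 0 ∨ n ≤ a := by
        rcases lt_trichotomy (a + b) 0 with hneg | hz | _ <;> [exact Or.inr (h1 hneg); exact Or.inl hz; omega]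
      rw [hstep]
      simp only [ball_alt]
      split_ifs <;> omega
    · obtain ⟨ha0, ha1, hn1⟩ := h2 hone
      rw [hstep]
      by_cases hnn : n ≤ a + b
      · simp only [ball_alt]
        split_ifs <;> omega
      · have hmod : PySem.Int.mod (n - 1) (a + b) = (n - 1) % (a + b) :=
          PySem.Int.mod_eq_emod_of_pos (by omega)
        have hm0 : (n - 1) % (a + b) = 0 := by rw [hone]; simp
        simp only [ball_alt, hmod, hm0]
        split_ifs <;> omega
    · omega
  all_goals {
    have hb : n ≤ (a + b) * ((n.toNat : Int) + 1) := by
      by_cases hn0 : n ≤ 0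
      · have : n.toNat = 0 := by omega
        rw [this]; push_cast; omega
      · have ht : (n.toNat : Int) = n := by omega
        rw [ht]; nlinarith
    exact ballFuel_eq n.toNat n a b (by omega) hb }
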